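-- pv_equiv track=rewrite | github.com/TimPelgrim/exactonline-mcp | src/exactonline_mcp/client.py | sanitize_odata_string
-- ===== SOURCE A (Python) =====
-- def sanitize_odata_string(value: str) -> str:
--     """Sanitize a string value for use in OData filter expressions.
--
--     Prevents OData injection by escaping single quotes and validating input.
--
--     Args:
--         value: The string value to sanitize.
--
--     Returns:
--         Sanitized string safe for OData filter interpolation.
--
--     Raises:
--         ValueError: If the input contains suspicious patterns.
--     """
--     if not isinstance(value, str):
--         raise ValueError("OData filter value must be a string")
--
--     # Reject obviously malicious patterns
--     suspicious_patterns = [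
--         " or ",
--         " and ",
--         " eq ",
--         " ne ",
--         " gt ",
--         " lt ",
--         " ge ",
--         " le ",
--     ]
--     lower_value = value.lower()
--     for pattern in suspicious_patterns:
--         if pattern in lower_value:
--             raise ValueError(f"Invalid characters in filter value: {value}")
--
--     # Escape single quotes by doubling them (OData standard)
--     return value.replace("'", "''")
-- ===== SOURCE B (Python) =====
-- _KEYWORDS = ("or ", "and ", "eq ", "ne ", "gt ", "lt ", "ge ", "le ")
--
--
-- def sanitize_odata_string(value: str) -> str:
--     """Sanitize a string value for use in OData filter expressions.
--
--     Single left-to-right scan: at every space, check whether one of the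
--     forbidden keywords (followed by a space) starts right after it.
--     """
--     if not isinstance(value, str):
--         raise ValueError("OData filter value must be a string")
--
--     low = value.lower()
--     for i, ch in enumerate(low):
--         if ch == " " and low.startswith(_KEYWORDS, i + 1):
--             raise ValueError(f"Invalid characters in filter value: {value}")
--
--     return value.replace("'", "''")
-- ===== Notes on version B (the rewrite author's own statement) =====
-- stated objective: idiomatic
-- what changed: A runs eight separate substring searches (one 'pattern in lower_value' per forbidden token); B makes a single left-to-right scan of the lowered string and, at each space, tests with one startswith-on-a-tuple whether a forbidden keyword plus trailing space follows; Pre_ excludes exactly the inputs on which both raise ValueError.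
import Mathlib
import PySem

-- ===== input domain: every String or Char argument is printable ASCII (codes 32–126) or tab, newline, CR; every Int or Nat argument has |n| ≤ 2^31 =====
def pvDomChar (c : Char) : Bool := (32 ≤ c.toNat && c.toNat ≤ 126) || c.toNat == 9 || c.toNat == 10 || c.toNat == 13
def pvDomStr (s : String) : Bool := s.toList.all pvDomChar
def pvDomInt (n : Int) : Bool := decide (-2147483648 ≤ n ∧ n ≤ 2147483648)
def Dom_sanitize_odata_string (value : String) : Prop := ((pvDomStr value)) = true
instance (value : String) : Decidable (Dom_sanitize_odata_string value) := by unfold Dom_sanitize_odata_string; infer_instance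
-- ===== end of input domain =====

-- B replaces A's loop over eight full patterns with one left-to-right scan that,
-- at each space, tests whether a forbidden keyword (plus trailing space) follows;
-- objective: idiomatic single pass, same observable behaviour (raises are outside Pre_).
-- Both Pythons raise ValueError on suspicious input; ports return value unchanged there (unreachable inside Pre_).

-- ===== PORT A =====
def sanitize_odata_string (value : String) : String :=
  let suspicious_patterns : List String :=
    [" or ", " and ", " eq ", " ne ", " gt ", " lt ", " ge ", " le "]
  let lower_value := PySem.Str.lower value
  -- the for-loop: if any pattern occurs, Python raises ValueError (excluded by Pre_)
  if suspicious_patterns.any (fun p => PySem.Str.isIn p lower_value) then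
    value  -- raise ValueError (unreachable under Pre_)
  else
    PySem.Str.replace value "'" "''"

-- ===== PORT B =====
def pvKeywords : List (List Char) :=
  ["or ".toList, "and ".toList, "eq ".toList, "ne ".toList,
   "gt ".toList, "lt ".toList, "ge ".toList, "le ".toList]

-- the for i, ch in enumerate(low) loop: true iff some space is followed by a keyword
def pvScan : List Char → Bool
  | [] => false
  | c :: rest =>
    (c == ' ' && pvKeywords.any (fun t => PySem.Chars.startswith rest t)) || pvScan rest

def sanitize_odata_string_alt (value : String) : String :=
  let low := PySem.Str.lower value
  if pvScan low.toList then
    value  -- raise ValueError (unreachable under Pre_)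
  else
    PySem.Str.replace value "'" "''"

-- ===== PRECONDITION & SPEC =====
-- Pre_ excludes exactly the inputs on which Python A raises ValueError
-- (a suspicious keyword surrounded by spaces occurs, case-insensitively).
def Pre_sanitize_odata_string (value : String) : Prop :=
  ([" or ", " and ", " eq ", " ne ", " gt ", " lt ", " ge ", " le "] : List String).all
    (fun p => !PySem.Str.isIn p (PySem.Str.lower value)) = true
instance (value : String) : Decidable (Pre_sanitize_odata_string value) := by
  unfold Pre_sanitize_odata_string; infer_instance

def pvWitness_sanitize_odata_string : String := "Name eq'd O'Brien"

def Spec_sanitize_odata_string (value : String) (out : String) : Prop := out = sanitize_odata_string_alt value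
instance (value : String) (out : String) : Decidable (Spec_sanitize_odata_string value out) := by unfold Spec_sanitize_odata_string; infer_instance

-- ===== CLAIM (what is proved, stated in full; the proofs are below) =====
def Claim_equal_sanitize_odata_string : Prop := ∀ (value : String), Dom_sanitize_odata_string value → Pre_sanitize_odata_string value → Spec_sanitize_odata_string value (sanitize_odata_string value)

-- ===== LEMMAS AND PROOFS =====

-- if B's scan fires, one of the keywords preceded by a space is an infix of the scanned list
theorem pvScan_infix (l : List Char) (h : pvScan l = true) :
    ∃ t ∈ pvKeywords, (' ' :: t) <:+: l := by
  induction l with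
  | nil => simp [pvScan] at h
  | cons c rest ih =>
    simp only [pvScan, Bool.or_eq_true, Bool.and_eq_true, List.any_eq_true, beq_iff_eq] at h
    rcases h with ⟨hc, t, ht, hs⟩ | h
    · refine ⟨t, ht, ?_⟩
      have hp := (PySem.Chars.startswith_iff rest t).mp hs
      subst hc
      exact (List.cons_prefix_cons.mpr ⟨rfl, hp⟩).isInfix
    · obtain ⟨t, ht, hi⟩ := ih h
      exact ⟨t, ht, hi.trans (List.suffix_cons c rest).isInfix⟩

theorem sanitize_lemma (value : String) (h : Pre_sanitize_odata_string value) :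
    sanitize_odata_string value = sanitize_odata_string_alt value := by
  unfold Pre_sanitize_odata_string at h
  rw [List.all_eq_true] at h
  have hno : ∀ p ∈ ([" or ", " and ", " eq ", " ne ", " gt ", " lt ", " ge ", " le "] : List String),
      PySem.Str.isIn p (PySem.Str.lower value) = false := by
    intro p hp
    have := h p hp
    simpa using this
  have hA : (([" or ", " and ", " eq ", " ne ", " gt ", " lt ", " ge ", " le "] : List String).any
      (fun p => PySem.Str.isIn p (PySem.Str.lower value))) = false := by
    rw [List.any_eq_false]
    intro p hp
    simp only [hno p hp]; exact Bool.false_ne_true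
  have hB : pvScan (PySem.Str.lower value).toList = false := by
    by_contra hb
    rw [Bool.not_eq_false] at hb
    obtain ⟨t, ht, hi⟩ := pvScan_infix _ hb
    have hfalse : False := by
      unfold pvKeywords at ht
      have hmk : ∀ p ∈ ([" or ", " and ", " eq ", " ne ", " gt ", " lt ", " ge ", " le "] : List String),
          p.toList = ' ' :: t → False := by
        intro p hp hl
        have : PySem.Str.isIn p (PySem.Str.lower value) = true := by
          rw [PySem.Str.isIn_iff_infix, hl]; exact hi
        rw [hno p hp] at this
        exact Bool.false_ne_true this
      simp only [List.mem_cons, List.not_mem_nil, or_false] at ht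
      rcases ht with rfl|rfl|rfl|rfl|rfl|rfl|rfl|rfl
      · exact hmk " or " (by simp) (by decide)
      · exact hmk " and " (by simp) (by decide)
      · exact hmk " eq " (by simp) (by decide)
      · exact hmk " ne " (by simp) (by decide)
      · exact hmk " gt " (by simp) (by decide)
      · exact hmk " lt " (by simp) (by decide)
      · exact hmk " ge " (by simp) (by decide)
      · exact hmk " le " (by simp) (by decide)
    exact hfalse
  unfold sanitize_odata_string sanitize_odata_string_alt
  simp only [hA, hB, Bool.false_eq_true, if_false]

-- ===== VERDICT (by name: the statement is the Claim_ definition above) =====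
theorem sanitize_odata_string_spec : Claim_equal_sanitize_odata_string := by
  intro value _ hpre
  unfold Spec_sanitize_odata_string
  exact sanitize_lemma value hpre
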